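-- pv_equiv track=rewrite | github.com/shogo314/icpc_standings | format.py | depth_analysis
-- ===== SOURCE A (Python) =====
-- def depth_analysis(l: list[str]) -> list[tuple[int, str]]:
--     ret: list[tuple[int, str]] = []
--     k = 0
--     for s in l:
--         if s.startswith("</div"):
--             k -= 1
--         elif s.startswith("<div"):
--             ret.append((k, s))
--             k += 1
--         else:
--             ret.append((k, s))
--     return ret
-- ===== SOURCE B (Python) =====
-- from itertools import accumulate
--
-- def depth_analysis(l: list[str]) -> list[tuple[int, str]]:
--     deltas = [-1 if s.startswith("</div") else 1 if s.startswith("<div") else 0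
--               for s in l]
--     depths = accumulate(deltas, initial=0)  # exclusive prefix sums (zip drops the last)
--     return [(d, s) for d, s in zip(depths, l) if not s.startswith("</div")]
-- ===== Notes on version B (the rewrite author's own statement) =====
-- stated objective: alternative
-- what changed: Replaces the fused counter loop with a precomputed exclusive prefix-sum depth table over per-line deltas followed by a separate zip-and-filter pass.
import Mathlib
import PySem

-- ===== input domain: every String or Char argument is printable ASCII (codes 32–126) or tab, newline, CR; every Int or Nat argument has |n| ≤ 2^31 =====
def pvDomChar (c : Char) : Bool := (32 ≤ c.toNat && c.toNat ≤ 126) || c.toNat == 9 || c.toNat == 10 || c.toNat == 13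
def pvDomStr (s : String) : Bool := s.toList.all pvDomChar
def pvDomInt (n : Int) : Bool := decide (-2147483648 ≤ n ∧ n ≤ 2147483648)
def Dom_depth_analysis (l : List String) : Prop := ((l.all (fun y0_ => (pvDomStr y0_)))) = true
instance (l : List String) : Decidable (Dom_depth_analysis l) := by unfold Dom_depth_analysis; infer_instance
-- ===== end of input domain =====

-- ===== PORT A =====
-- B decomposes A's fused counter loop into a delta map + exclusive prefix sums + a zip/filter pass (objective: alternative).
def depth_analysis (l : List String) : List (Int × String) :=
  (l.foldl (fun (st : List (Int × String) × Int) s =>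
    if PySem.Str.startswith s "</div" then (st.1, st.2 - 1)
    else if PySem.Str.startswith s "<div" then (st.1 ++ [(st.2, s)], st.2 + 1)
    else (st.1 ++ [(st.2, s)], st.2)) ([], 0)).1

-- ===== PORT B =====
def pvDelta (s : String) : Int :=
  if PySem.Str.startswith s "</div" then -1
  else if PySem.Str.startswith s "<div" then 1 else 0

def depth_analysis_alt (l : List String) : List (Int × String) :=
  let deltas := l.map pvDelta
  let depths := List.scanl (· + ·) 0 deltas
  (depths.zip l).filter (fun p => !PySem.Str.startswith p.2 "</div")

-- ===== PRECONDITION & SPEC =====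
def Spec_depth_analysis (l : List String) (out : List (Int × String)) : Prop := out = depth_analysis_alt l
instance (l : List String) (out : List (Int × String)) : Decidable (Spec_depth_analysis l out) := by unfold Spec_depth_analysis; infer_instance

-- ===== CLAIM (what is proved, stated in full; the proofs are below) =====
def Claim_equal_depth_analysis : Prop := ∀ (l : List String), Dom_depth_analysis l → Spec_depth_analysis l (depth_analysis l)

-- ===== LEMMAS AND PROOFS =====
theorem depth_analysis_loop (l : List String) (acc : List (Int × String)) (k : Int) :
    (l.foldl (fun (st : List (Int × String) × Int) s =>
      if PySem.Str.startswith s "</div" then (st.1, st.2 - 1)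
      else if PySem.Str.startswith s "<div" then (st.1 ++ [(st.2, s)], st.2 + 1)
      else (st.1 ++ [(st.2, s)], st.2)) (acc, k)).1
    = acc ++ ((List.scanl (· + ·) k (l.map pvDelta)).zip l).filter
        (fun p => !PySem.Str.startswith p.2 "</div") := by
  induction l generalizing acc k with
  | nil => simp
  | cons s rest ih =>
    simp only [List.foldl_cons, List.map_cons, List.scanl_cons, List.zip_cons_cons,
      List.filter_cons]
    by_cases h1 : PySem.Str.startswith s "</div"
    · simp [h1, pvDelta, -PySem.Str.startswith_eq, show ∀ k : Int, k + (-1) = k - 1 from fun k => by ring, ih]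
    · by_cases h2 : PySem.Str.startswith s "<div"
      · simp [h1, h2, ih, pvDelta, -PySem.Str.startswith_eq]
      · simp [h1, h2, ih, pvDelta, -PySem.Str.startswith_eq]

-- ===== VERDICT (by name: the statement is the Claim_ definition above) =====
theorem depth_analysis_spec : Claim_equal_depth_analysis := by
  intro l _
  unfold Spec_depth_analysis depth_analysis depth_analysis_alt
  simpa using depth_analysis_loop l [] 0
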